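-- pv_equiv track=rewrite | github.com/jcraig949jfi/Prometheus | cartography/v2/genus2_phase_coherence.py | _eval_poly_GF4
-- ===== SOURCE A (Python) =====
-- def _eval_poly_GF4(coeffs, xa, xb):
--     """Evaluate polynomial at (xa, xb) in GF(4) = F_2[w]/(w^2+w+1)."""
--     val_a, val_b = 0, 0
--     pow_a, pow_b = 1, 0
--     for c in coeffs:
--         c2 = c % 2
--         val_a = (val_a + c2 * pow_a) % 2
--         val_b = (val_b + c2 * pow_b) % 2
--         # multiply power by x:  (pa+pb*w)(xa+xb*w)
--         # = pa*xa + (pa*xb+pb*xa)*w + pb*xb*w^2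
--         # = pa*xa + pb*xb + (pa*xb + pb*xa + pb*xb)*w   [since w^2=w+1]
--         new_a = (pow_a * xa + pow_b * xb) % 2
--         new_b = (pow_a * xb + pow_b * xa + pow_b * xb) % 2
--         pow_a, pow_b = new_a, new_b
--     return val_a, val_b
-- ===== SOURCE B (Python) =====
-- def _eval_poly_GF4(coeffs, xa, xb):
--     """Evaluate polynomial at (xa, xb) in GF(4) by Horner's method (highest degree first)."""
--     val_a, val_b = 0, 0
--     for c in reversed(coeffs):
--         # multiply accumulator by x in GF(4) with w^2 = w+1, then add constant term
--         val_a, val_b = ((val_a * xa + val_b * xb) % 2,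
--                         (val_a * xb + val_b * xa + val_b * xb) % 2)
--         val_a = (val_a + c % 2) % 2
--     return val_a, val_b
-- ===== Notes on version B (the rewrite author's own statement) =====
-- stated objective: simpler
-- what changed: Replaced A's running-power-of-x accumulation over ascending coefficients with Horner's method over the reversed coefficient list (the accumulator itself is multiplied by x; no power pair is maintained).
import Mathlib
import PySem

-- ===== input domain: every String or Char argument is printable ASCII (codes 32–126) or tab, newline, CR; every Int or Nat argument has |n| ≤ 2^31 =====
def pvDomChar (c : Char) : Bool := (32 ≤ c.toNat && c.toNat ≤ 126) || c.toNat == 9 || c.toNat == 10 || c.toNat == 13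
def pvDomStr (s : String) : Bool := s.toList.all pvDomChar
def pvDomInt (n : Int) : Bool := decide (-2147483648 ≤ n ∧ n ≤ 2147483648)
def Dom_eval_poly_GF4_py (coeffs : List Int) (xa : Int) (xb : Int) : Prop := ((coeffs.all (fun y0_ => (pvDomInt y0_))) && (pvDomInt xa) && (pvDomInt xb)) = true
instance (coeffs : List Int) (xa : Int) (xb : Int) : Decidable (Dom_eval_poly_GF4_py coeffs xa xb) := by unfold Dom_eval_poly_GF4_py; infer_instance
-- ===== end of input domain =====

-- B replaces A's running-power accumulation with Horner's method over the reversed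
-- coefficient list (objective: simpler — no power pair is maintained).

-- ===== PORT A =====
-- A threads (val_a, val_b, pow_a, pow_b) through the coefficients in ascending order.
def eval_poly_GF4_py (coeffs : List Int) (xa : Int) (xb : Int) : Int × Int :=
  let st := coeffs.foldl
    (fun (s : Int × Int × Int × Int) (c : Int) =>
      let c2 := c % 2
      let va := (s.1 + c2 * s.2.2.1) % 2
      let vb := (s.2.1 + c2 * s.2.2.2) % 2
      let na := (s.2.2.1 * xa + s.2.2.2 * xb) % 2
      let nb := (s.2.2.1 * xb + s.2.2.2 * xa + s.2.2.2 * xb) % 2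
      (va, vb, na, nb))
    (0, 0, 1, 0)
  (st.1, st.2.1)

-- ===== PORT B =====
-- Horner: multiply the accumulator by x in GF(4), then add c % 2, over reversed coeffs.
def eval_poly_GF4_py_alt (coeffs : List Int) (xa : Int) (xb : Int) : Int × Int :=
  coeffs.reverse.foldl
    (fun (v : Int × Int) (c : Int) =>
      let ma := (v.1 * xa + v.2 * xb) % 2
      let mb := (v.1 * xb + v.2 * xa + v.2 * xb) % 2
      ((ma + c % 2) % 2, mb))
    (0, 0)

-- ===== PRECONDITION & SPEC =====
def Spec_eval_poly_GF4_py (coeffs : List Int) (xa : Int) (xb : Int) (out : Int × Int) : Prop := out = eval_poly_GF4_py_alt coeffs xa xb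
instance (coeffs : List Int) (xa : Int) (xb : Int) (out : Int × Int) : Decidable (Spec_eval_poly_GF4_py coeffs xa xb out) := by unfold Spec_eval_poly_GF4_py; infer_instance

-- ===== CLAIM (what is proved, stated in full; the proofs are below) =====
def Claim_equal_eval_poly_GF4_py : Prop := ∀ (coeffs : List Int) (xa : Int) (xb : Int), Dom_eval_poly_GF4_py coeffs xa xb → Spec_eval_poly_GF4_py coeffs xa xb (eval_poly_GF4_py coeffs xa xb)

-- ===== LEMMAS AND PROOFS =====

-- GF(4) multiplication on the (a, b) = a + b·w representation, reduced mod 2.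
def gf4mul (p v : Int × Int) : Int × Int :=
  ((p.1 * v.1 + p.2 * v.2) % 2, (p.1 * v.2 + p.2 * v.1 + p.2 * v.2) % 2)

-- "multiply by x" as B's step does it
def mulx (xa xb : Int) (v : Int × Int) : Int × Int :=
  ((v.1 * xa + v.2 * xb) % 2, (v.1 * xb + v.2 * xa + v.2 * xb) % 2)

lemma alt_nil (xa xb : Int) : eval_poly_GF4_py_alt [] xa xb = (0, 0) := rfl

lemma alt_cons (c : Int) (cs : List Int) (xa xb : Int) :
    eval_poly_GF4_py_alt (c :: cs) xa xb =
      (((mulx xa xb (eval_poly_GF4_py_alt cs xa xb)).1 + c % 2) % 2,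
        (mulx xa xb (eval_poly_GF4_py_alt cs xa xb)).2) := by
  simp [eval_poly_GF4_py_alt, mulx, List.foldl_append]

lemma alt_b01 (cs : List Int) (xa xb : Int) :
    ((eval_poly_GF4_py_alt cs xa xb).1 = 0 ∨ (eval_poly_GF4_py_alt cs xa xb).1 = 1) ∧
    ((eval_poly_GF4_py_alt cs xa xb).2 = 0 ∨ (eval_poly_GF4_py_alt cs xa xb).2 = 1) := by
  cases cs with
  | nil => simp [alt_nil]
  | cons c cs => rw [alt_cons]; exact ⟨Int.emod_two_eq _, Int.emod_two_eq _⟩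

-- x·p then ·v  =  p · (x·v)  (associativity/commutativity instance we need)
lemma gf4mul_mulx (xa xb : Int) (p v : Int × Int)
    (hp1 : p.1 = 0 ∨ p.1 = 1) (hp2 : p.2 = 0 ∨ p.2 = 1)
    (hv1 : v.1 = 0 ∨ v.1 = 1) (hv2 : v.2 = 0 ∨ v.2 = 1) :
    gf4mul (mulx xa xb p) v = gf4mul p (mulx xa xb v) := by
  obtain ⟨a, b⟩ := p; obtain ⟨u, w⟩ := v
  simp only [gf4mul, mulx] at *
  rcases hp1 with h | h <;> subst h <;> rcases hp2 with h | h <;> subst h <;>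
    rcases hv1 with h | h <;> subst h <;> rcases hv2 with h | h <;> subst h <;>
    (simp only [Prod.mk.injEq]; constructor <;> omega)

-- A's loop, characterised: starting from values (va, vb) and power (pa, pb),
-- it returns (va, vb) + (pa, pb) · Horner(cs), componentwise mod 2.
lemma loopA_char (xa xb : Int) (cs : List Int) :
    ∀ (va vb pa pb : Int),
      (va = 0 ∨ va = 1) → (vb = 0 ∨ vb = 1) → (pa = 0 ∨ pa = 1) → (pb = 0 ∨ pb = 1) →
      (cs.foldl
        (fun (s : Int × Int × Int × Int) (c : Int) =>
          let c2 := c % 2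
          let va := (s.1 + c2 * s.2.2.1) % 2
          let vb := (s.2.1 + c2 * s.2.2.2) % 2
          let na := (s.2.2.1 * xa + s.2.2.2 * xb) % 2
          let nb := (s.2.2.1 * xb + s.2.2.2 * xa + s.2.2.2 * xb) % 2
          (va, vb, na, nb))
        (va, vb, pa, pb)).1 = (va + (gf4mul (pa, pb) (eval_poly_GF4_py_alt cs xa xb)).1) % 2 ∧
      (cs.foldl
        (fun (s : Int × Int × Int × Int) (c : Int) =>
          let c2 := c % 2
          let va := (s.1 + c2 * s.2.2.1) % 2
          let vb := (s.2.1 + c2 * s.2.2.2) % 2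
          let na := (s.2.2.1 * xa + s.2.2.2 * xb) % 2
          let nb := (s.2.2.1 * xb + s.2.2.2 * xa + s.2.2.2 * xb) % 2
          (va, vb, na, nb))
        (va, vb, pa, pb)).2.1 = (vb + (gf4mul (pa, pb) (eval_poly_GF4_py_alt cs xa xb)).2) % 2 := by
  induction cs with
  | nil =>
      intro va vb pa pb hva hvb _ _
      simp only [List.foldl_nil, alt_nil, gf4mul]
      constructor <;> simp <;> omega
  | cons c cs ih =>
      intro va vb pa pb hva hvb hpa hpb
      simp only [List.foldl_cons]
      have h := ih ((va + c % 2 * pa) % 2) ((vb + c % 2 * pb) % 2)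
        ((pa * xa + pb * xb) % 2) ((pa * xb + pb * xa + pb * xb) % 2)
        (Int.emod_two_eq _) (Int.emod_two_eq _) (Int.emod_two_eq _) (Int.emod_two_eq _)
      obtain ⟨h1, h2⟩ := h
      rw [h1, h2]
      have hassoc : gf4mul ((pa * xa + pb * xb) % 2, (pa * xb + pb * xa + pb * xb) % 2)
          (eval_poly_GF4_py_alt cs xa xb)
          = gf4mul (pa, pb) (mulx xa xb (eval_poly_GF4_py_alt cs xa xb)) := by
        have := gf4mul_mulx xa xb (pa, pb) (eval_poly_GF4_py_alt cs xa xb) hpa hpb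
          (alt_b01 cs xa xb).1 (alt_b01 cs xa xb).2
        simpa [mulx] using this
      rw [hassoc, alt_cons]
      obtain ⟨u, w⟩ := mulx xa xb (eval_poly_GF4_py_alt cs xa xb)
      simp only [gf4mul]
      rcases hpa with h | h <;> subst h <;> rcases hpb with h | h <;> subst h <;>
        rcases Int.emod_two_eq c with hc | hc <;> rw [hc] <;> constructor <;> simp <;> omega

-- ===== VERDICT (by name: the statement is the Claim_ definition above) =====
theorem eval_poly_GF4_py_spec : Claim_equal_eval_poly_GF4_py := by
  intro coeffs xa xb _
  unfold Spec_eval_poly_GF4_py eval_poly_GF4_py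
  have h := loopA_char xa xb coeffs 0 0 1 0 (Or.inl rfl) (Or.inl rfl) (Or.inr rfl) (Or.inl rfl)
  obtain ⟨h1, h2⟩ := h
  obtain ⟨hb1, hb2⟩ := alt_b01 coeffs xa xb
  simp only []
  rw [h1, h2, Prod.ext_iff]
  simp only [gf4mul]
  constructor <;> simp <;> omega
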